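-- pv_equiv track=rewrite | github.com/YashVisavadiya/Advent-Of-Code-2024 | Day 2/Red-Nosed Reports.py | is_safe_report
-- ===== SOURCE A (Python) =====
-- def is_safe_report(report):
--     prev = report[0]
--     inc_or_dec = report == sorted(report) or report == sorted(report, reverse=True)
--
--     if not inc_or_dec:
--         return False
--
--     for curr in report[1:]:
--         if not (1 <= abs(curr - prev) <= 3):
--             return False
--         prev = curr
--
--     return True
-- ===== SOURCE B (Python) =====
-- def is_safe_report(report):
--     inc = True
--     dec = True
--     for prev, curr in zip(report, report[1:]):
--         d = curr - prev
--         if not (1 <= d <= 3):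
--             inc = False
--         if not (-3 <= d <= -1):
--             dec = False
--     return inc or dec
-- ===== Notes on version B (the rewrite author's own statement) =====
-- stated objective: faster
-- what changed: B replaces the two sorted() copies plus a separate abs-diff loop by one pass over adjacent pairs tracking two flags (all diffs between 1 and 3 / all between -3 and -1), which implies monotonicity without sorting.
import Mathlib
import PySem

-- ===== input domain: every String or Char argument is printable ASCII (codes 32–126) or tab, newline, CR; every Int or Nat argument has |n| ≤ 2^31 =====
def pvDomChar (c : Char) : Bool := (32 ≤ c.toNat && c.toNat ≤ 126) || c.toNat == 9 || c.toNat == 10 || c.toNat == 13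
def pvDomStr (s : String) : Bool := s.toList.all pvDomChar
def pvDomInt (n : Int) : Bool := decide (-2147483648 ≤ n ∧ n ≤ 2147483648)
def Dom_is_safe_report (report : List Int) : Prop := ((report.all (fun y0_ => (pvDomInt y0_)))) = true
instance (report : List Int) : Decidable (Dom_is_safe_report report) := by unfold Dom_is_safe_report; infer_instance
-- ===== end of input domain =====

-- B replaces the two sorted() copies plus a separate abs-diff loop of A by one O(n) pass over
-- adjacent pairs tracking two flags; equal return values on every nonempty list (A raises on []).

-- ===== PORT A =====
-- the 'for curr in report[1:]' loop with early return False
def pvLoopA (prev : Int) : List Int → Bool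
  | [] => true
  | c :: rest => if ¬ (1 ≤ |c - prev| ∧ |c - prev| ≤ 3) then false else pvLoopA c rest

def is_safe_report (report : List Int) : Bool :=
  match PySem.List.pyGet? report 0 with
  | none => false   -- reading the first element raises IndexError in Python; excluded by Pre_
  | some prev =>
    let inc_or_dec :=
      (report == PySem.List.sorted report (fun x => x) false) ||
      (report == PySem.List.sorted report (fun x => x) true)
    if ¬ inc_or_dec then false
    else pvLoopA prev (PySem.List.slice report (some 1) none)

-- ===== PORT B =====
def is_safe_report_alt (report : List Int) : Bool :=
  let p := (report.zip (PySem.List.slice report (some 1) none)).foldl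
    (fun (st : Bool × Bool) pc =>
      let d := pc.2 - pc.1
      ((if ¬ (1 ≤ d ∧ d ≤ 3) then false else st.1),
       (if ¬ (-3 ≤ d ∧ d ≤ -1) then false else st.2)))
    (true, true)
  p.1 || p.2

-- ===== PRECONDITION & SPEC =====
-- Pre_ excludes only the empty list, on which A raises IndexError reading the first element.
def Pre_is_safe_report (report : List Int) : Prop := report ≠ []
instance (report : List Int) : Decidable (Pre_is_safe_report report) := by
  unfold Pre_is_safe_report; infer_instance
def pvWitness_is_safe_report : List Int := [1, 2, 4]

def Spec_is_safe_report (report : List Int) (out : Bool) : Prop := out = is_safe_report_alt report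
instance (report : List Int) (out : Bool) : Decidable (Spec_is_safe_report report out) := by
  unfold Spec_is_safe_report; infer_instance

-- ===== CLAIM (what is proved, stated in full; the proofs are below) =====
def Claim_equal_is_safe_report : Prop := ∀ (report : List Int), Dom_is_safe_report report → Pre_is_safe_report report → Spec_is_safe_report report (is_safe_report report)

-- ===== LEMMAS AND PROOFS =====

-- Boolean chains used to characterise both ports
def pvAllInc (prev : Int) : List Int → Bool
  | [] => true
  | c :: rest => (decide (1 ≤ c - prev ∧ c - prev ≤ 3)) && pvAllInc c rest

def pvAllDec (prev : Int) : List Int → Bool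
  | [] => true
  | c :: rest => (decide (-3 ≤ c - prev ∧ c - prev ≤ -1)) && pvAllDec c rest

-- B's fold computes the two chains
theorem foldB_eq (xs : List Int) : ∀ (prev : Int) (i d : Bool),
    ((prev :: xs).zip xs).foldl
      (fun (st : Bool × Bool) pc =>
        let d := pc.2 - pc.1
        ((if ¬ (1 ≤ d ∧ d ≤ 3) then false else st.1),
         (if ¬ (-3 ≤ d ∧ d ≤ -1) then false else st.2)))
      (i, d)
    = (i && pvAllInc prev xs, d && pvAllDec prev xs) := by
  induction xs with
  | nil => intro prev i d; simp [pvAllInc, pvAllDec]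
  | cons c rest ih =>
    intro prev i d
    simp only [List.zip_cons_cons, List.foldl_cons, ih, pvAllInc, pvAllDec]
    by_cases h1 : 1 ≤ c - prev ∧ c - prev ≤ 3 <;>
      by_cases h2 : -3 ≤ c - prev ∧ c - prev ≤ -1 <;>
        cases i <;> cases d <;> simp [h1, h2, ← decide_not]

theorem alt_cons (prev : Int) (xs : List Int) :
    is_safe_report_alt (prev :: xs) = (pvAllInc prev xs || pvAllDec prev xs) := by
  simp only [is_safe_report_alt, PySem.List.slice_from_one, List.tail_cons]
  rw [foldB_eq]
  simp

theorem allInc_lt {prev : Int} {xs : List Int} (h : pvAllInc prev xs = true) :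
    ∀ y ∈ xs, prev < y := by
  induction xs generalizing prev with
  | nil => simp
  | cons c rest ih =>
    simp only [pvAllInc, Bool.and_eq_true, decide_eq_true_eq] at h
    intro y hy
    rcases List.mem_cons.mp hy with rfl | hy
    · omega
    · have := ih h.2 y hy; omega

theorem allDec_gt {prev : Int} {xs : List Int} (h : pvAllDec prev xs = true) :
    ∀ y ∈ xs, y < prev := by
  induction xs generalizing prev with
  | nil => simp
  | cons c rest ih =>
    simp only [pvAllDec, Bool.and_eq_true, decide_eq_true_eq] at h
    intro y hy
    rcases List.mem_cons.mp hy with rfl | hy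
    · omega
    · have := ih h.2 y hy; omega

theorem allInc_pairwise {prev : Int} {xs : List Int} (h : pvAllInc prev xs = true) :
    List.Pairwise (fun a b : Int => a ≤ b) (prev :: xs) := by
  induction xs generalizing prev with
  | nil => simp
  | cons c rest ih =>
    simp only [pvAllInc, Bool.and_eq_true, decide_eq_true_eq] at h
    exact List.pairwise_cons.mpr
      ⟨fun y hy => le_of_lt (allInc_lt (by simp [pvAllInc, h.1, h.2]) y hy), ih h.2⟩

theorem allDec_pairwise {prev : Int} {xs : List Int} (h : pvAllDec prev xs = true) :
    List.Pairwise (fun a b : Int => b ≤ a) (prev :: xs) := by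
  induction xs generalizing prev with
  | nil => simp
  | cons c rest ih =>
    simp only [pvAllDec, Bool.and_eq_true, decide_eq_true_eq] at h
    exact List.pairwise_cons.mpr
      ⟨fun y hy => le_of_lt (allDec_gt (by simp [pvAllDec, h.1, h.2]) y hy), ih h.2⟩

theorem allInc_loopA {prev : Int} {xs : List Int} (h : pvAllInc prev xs = true) :
    pvLoopA prev xs = true := by
  induction xs generalizing prev with
  | nil => rfl
  | cons c rest ih =>
    simp only [pvAllInc, Bool.and_eq_true, decide_eq_true_eq] at h
    have habs : |c - prev| = c - prev := abs_of_nonneg (by omega)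
    simp only [pvLoopA]
    rw [if_neg (by omega)]
    exact ih h.2

theorem allDec_loopA {prev : Int} {xs : List Int} (h : pvAllDec prev xs = true) :
    pvLoopA prev xs = true := by
  induction xs generalizing prev with
  | nil => rfl
  | cons c rest ih =>
    simp only [pvAllDec, Bool.and_eq_true, decide_eq_true_eq] at h
    have habs : |c - prev| = -(c - prev) := abs_of_nonpos (by omega)
    simp only [pvLoopA]
    rw [if_neg (by omega)]
    exact ih h.2

theorem loopA_pairwise_inc {prev : Int} {xs : List Int}
    (hl : pvLoopA prev xs = true)
    (hp : List.Pairwise (fun a b : Int => a ≤ b) (prev :: xs)) :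
    pvAllInc prev xs = true := by
  induction xs generalizing prev with
  | nil => rfl
  | cons c rest ih =>
    simp only [pvLoopA] at hl
    by_cases h : 1 ≤ |c - prev| ∧ |c - prev| ≤ 3
    · rw [if_neg (not_not_intro h)] at hl
      rcases List.pairwise_cons.mp hp with ⟨hle, hp'⟩
      have h1 : prev ≤ c := hle c (by simp)
      simp only [pvAllInc, Bool.and_eq_true, decide_eq_true_eq]
      have habs : |c - prev| = c - prev := abs_of_nonneg (by omega)
      exact ⟨by omega, ih hl hp'⟩
    · rw [if_pos h] at hl
      exact absurd hl (by simp)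

theorem loopA_pairwise_dec {prev : Int} {xs : List Int}
    (hl : pvLoopA prev xs = true)
    (hp : List.Pairwise (fun a b : Int => b ≤ a) (prev :: xs)) :
    pvAllDec prev xs = true := by
  induction xs generalizing prev with
  | nil => rfl
  | cons c rest ih =>
    simp only [pvLoopA] at hl
    by_cases h : 1 ≤ |c - prev| ∧ |c - prev| ≤ 3
    · rw [if_neg (not_not_intro h)] at hl
      rcases List.pairwise_cons.mp hp with ⟨hle, hp'⟩
      have h1 : c ≤ prev := hle c (by simp)
      simp only [pvAllDec, Bool.and_eq_true, decide_eq_true_eq]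
      have habs : |c - prev| = -(c - prev) := abs_of_nonpos (by omega)
      exact ⟨by omega, ih hl hp'⟩
    · rw [if_pos h] at hl
      exact absurd hl (by simp)

theorem main_eq (prev : Int) (xs : List Int) :
    is_safe_report (prev :: xs) = is_safe_report_alt (prev :: xs) := by
  rw [alt_cons]
  simp only [is_safe_report, PySem.List.pyGet?_zero_cons, PySem.List.slice_from_one,
    List.tail_cons]
  by_cases hb : pvAllInc prev xs = true ∨ pvAllDec prev xs = true
  · have hio : ((prev :: xs == PySem.List.sorted (prev :: xs) (fun x => x) false) ||
        (prev :: xs == PySem.List.sorted (prev :: xs) (fun x => x) true)) = true := by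
      rcases hb with h | h
      · have := PySem.List.sorted_eq_self_of_pairwise (prev :: xs) (fun x => x)
          (allInc_pairwise h)
        simp [this]
      · have := PySem.List.sorted_rev_eq_self_of_pairwise (prev :: xs) (fun x => x)
          (allDec_pairwise h)
        simp [this]
    have hloop : pvLoopA prev xs = true := by
      rcases hb with h | h
      · exact allInc_loopA h
      · exact allDec_loopA h
    rw [hio]
    have hif : (if ¬ (true = true) then false else pvLoopA prev xs) = pvLoopA prev xs := by simp
    rw [hif, hloop]
    rcases hb with h | h <;> simp [h]
  · rw [not_or] at hb
    by_cases hio : ((prev :: xs == PySem.List.sorted (prev :: xs) (fun x => x) false) ||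
        (prev :: xs == PySem.List.sorted (prev :: xs) (fun x => x) true)) = true
    · rw [hio]
      by_cases hloop : pvLoopA prev xs = true
      · exfalso
        simp only [Bool.or_eq_true, beq_iff_eq] at hio
        rcases hio with h | h
        · have hp : List.Pairwise (fun a b : Int => a ≤ b) (prev :: xs) := by
            rw [h]; exact PySem.List.sorted_pairwise _ _
          exact hb.1 (loopA_pairwise_inc hloop hp)
        · have hp : List.Pairwise (fun a b : Int => b ≤ a) (prev :: xs) := by
            rw [h]; exact PySem.List.sorted_pairwise_rev _ _
          exact hb.2 (loopA_pairwise_dec hloop hp)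
      · have h1 : pvAllInc prev xs = false := Bool.eq_false_iff.mpr hb.1
        have h2 : pvAllDec prev xs = false := Bool.eq_false_iff.mpr hb.2
        have hl : pvLoopA prev xs = false := Bool.eq_false_iff.mpr hloop
        have hif : (if ¬ (true = true) then false else pvLoopA prev xs) = pvLoopA prev xs := by
          simp
        rw [hif, hl, h1, h2]
        simp
    · have h1 : pvAllInc prev xs = false := Bool.eq_false_iff.mpr hb.1
      have h2 : pvAllDec prev xs = false := Bool.eq_false_iff.mpr hb.2
      have hio' := Bool.eq_false_iff.mpr hio
      rw [hio', h1, h2]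
      simp

-- ===== VERDICT (by name: the statement is the Claim_ definition above) =====
theorem is_safe_report_spec : Claim_equal_is_safe_report := by
  intro report _ hpre
  unfold Spec_is_safe_report
  match report with
  | [] => exact absurd rfl hpre
  | prev :: xs => exact main_eq prev xs
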